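-- pv_equiv track=rewrite | github.com/pimdegroot/circledisplay | software/circuitpython/circlelib/circletools.py | progresscounter
-- ===== SOURCE A (Python) =====
-- def circleleds(leds):
--     output = 0
--     offset = 0
--
--     for i in range(16):
--         if leds[i] == 1:
--             output = output | (1 << ((i+offset)%16))
--
--     #hexoutput = "{:04X}".format(output)
--     #return hexoutput
--     return output
--
-- def progresscounter(step, points):
--     leds = [0]*16
--
--     if points == 0:
--         if step % 16 < 8:
--             leds[0] = 1
--
--     if points == 1:
--         leds[step%16] = 1
--
--     elif points == 2:
--         leds[step%16] = 1
--         leds[(step + 8)%16] = 1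
--
--     elif points == 3:
--         leds[step%16] = 1
--         leds[(step + 6)%16] = 1
--         leds[(step + 10)%16] = 1
--
--     elif points == 4:
--         leds[step%16] = 1
--         leds[(step + 4)%16] = 1
--         leds[(step + 8)%16] = 1
--         leds[(step + 12)%16] = 1
--
--     elif points == 8:
--         for i in range(16):
--             leds[i] = (step+i)%2
--
--     elif points == 9:
--         for i in range((step%16)+1):
--             leds[i] = 1
--
--     elif points == 10:
--         for i in range((step%17)):
--             leds[i] = 1
--
--     elif points == 11:
--         if step > 0 and step < 17:
--             for i in range((step)):
--                 leds[i] = 1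
--
--         if step <= 0:
--             step = abs(step)
--
--             for i in range(16):
--                 if i < step:
--                     leds[15-i] = 1
--
--
--     elif points == 15:
--         leds = [1]*16
--         leds[step%16] = 0
--
--
--     return circleleds(leds)
-- ===== SOURCE B (Python) =====
-- def progresscounter(step, points):
--     if points == 0:
--         return 1 if step % 16 < 8 else 0
--     if points == 1:
--         return 1 << (step % 16)
--     if points == 2:
--         return (1 << (step % 16)) | (1 << ((step + 8) % 16))
--     if points == 3:
--         return (1 << (step % 16)) | (1 << ((step + 6) % 16)) | (1 << ((step + 10) % 16))
--     if points == 4: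
--         return (1 << (step % 16)) | (1 << ((step + 4) % 16)) | (1 << ((step + 8) % 16)) | (1 << ((step + 12) % 16))
--     if points == 8:
--         return 0xAAAA if step % 2 == 0 else 0x5555
--     if points == 9:
--         return (1 << (step % 16 + 1)) - 1
--     if points == 10:
--         return (1 << (step % 17)) - 1
--     if points == 11:
--         if 0 < step < 17:
--             return (1 << step) - 1
--         if step <= 0:
--             m = min(-step, 16)
--             return ((1 << m) - 1) << (16 - m)
--         return 0
--     if points == 15:
--         return 0xFFFF ^ (1 << (step % 16))
--     return 0
-- ===== Notes on version B (the rewrite author's own statement) =====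
-- stated objective: simpler
-- what changed: B computes the 16-bit pattern directly with shift/mask arithmetic per points value instead of filling a 16-cell list and packing it bit by bit with circleleds.
import Mathlib
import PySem

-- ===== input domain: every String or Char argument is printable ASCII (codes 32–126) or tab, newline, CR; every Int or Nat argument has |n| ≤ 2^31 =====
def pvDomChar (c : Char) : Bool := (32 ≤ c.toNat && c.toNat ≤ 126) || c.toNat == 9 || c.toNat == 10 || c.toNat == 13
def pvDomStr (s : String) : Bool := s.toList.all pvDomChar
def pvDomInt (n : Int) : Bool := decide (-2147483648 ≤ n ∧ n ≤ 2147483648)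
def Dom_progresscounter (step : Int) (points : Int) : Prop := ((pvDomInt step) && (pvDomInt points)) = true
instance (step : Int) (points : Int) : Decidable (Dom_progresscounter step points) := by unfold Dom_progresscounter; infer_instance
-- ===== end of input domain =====

-- B computes the 16-bit pattern directly with shift/mask arithmetic instead of filling a
-- 16-cell list and packing it bit by bit (objective: simpler).

-- ===== PORT A =====
-- leds[i] is read with pyGet?; every call site passes a list of length 16 and i ∈ [0,16),
-- so the .getD 0 default is never used (exact).  Indices written with .set use .toNat on
-- values that are Python-nonnegative (results of % with positive divisor, or loop indices),
-- so .toNat is exact there.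
def circleleds (leds : List Int) : Int :=
  let output : Int := 0
  let offset : Int := 0
  (PySem.List.pyRange 0 16 1).foldl
    (fun output i =>
      if (PySem.List.pyGet? leds i).getD 0 = 1 then
        PySem.Int.bor output (1 <<< (PySem.Int.mod (i + offset) 16).toNat)
      else output)
    output

def progresscounter (step : Int) (points : Int) : Int :=
  let leds : List Int := List.replicate 16 0
  let leds :=
    if points = 0 then
      (if PySem.Int.mod step 16 < 8 then leds.set 0 1 else leds)
    else leds
  let leds :=
    if points = 1 then
      leds.set (PySem.Int.mod step 16).toNat 1
    else if points = 2 then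
      (leds.set (PySem.Int.mod step 16).toNat 1).set (PySem.Int.mod (step + 8) 16).toNat 1
    else if points = 3 then
      ((leds.set (PySem.Int.mod step 16).toNat 1).set (PySem.Int.mod (step + 6) 16).toNat 1).set
        (PySem.Int.mod (step + 10) 16).toNat 1
    else if points = 4 then
      (((leds.set (PySem.Int.mod step 16).toNat 1).set (PySem.Int.mod (step + 4) 16).toNat 1).set
        (PySem.Int.mod (step + 8) 16).toNat 1).set (PySem.Int.mod (step + 12) 16).toNat 1
    else if points = 8 then
      (PySem.List.pyRange 0 16 1).foldl (fun l i => l.set i.toNat (PySem.Int.mod (step + i) 2)) leds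
    else if points = 9 then
      (PySem.List.pyRange 0 (PySem.Int.mod step 16 + 1) 1).foldl (fun l i => l.set i.toNat 1) leds
    else if points = 10 then
      (PySem.List.pyRange 0 (PySem.Int.mod step 17) 1).foldl (fun l i => l.set i.toNat 1) leds
    else if points = 11 then
      let leds :=
        if step > 0 ∧ step < 17 then
          (PySem.List.pyRange 0 step 1).foldl (fun l i => l.set i.toNat 1) leds
        else leds
      if step ≤ 0 then
        -- Python rebinds step := abs(step) here; i and 15-i are in [0,16)
        let step := |step|
        (PySem.List.pyRange 0 16 1).foldl
          (fun l i => if i < step then l.set (15 - i).toNat 1 else l) leds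
      else leds
    else if points = 15 then
      (List.replicate 16 1).set (PySem.Int.mod step 16).toNat 0
    else leds
  circleleds leds

-- ===== PORT B =====
def progresscounter_alt (step : Int) (points : Int) : Int :=
  if points = 0 then
    (if PySem.Int.mod step 16 < 8 then 1 else 0)
  else if points = 1 then
    1 <<< (PySem.Int.mod step 16).toNat
  else if points = 2 then
    PySem.Int.bor (1 <<< (PySem.Int.mod step 16).toNat) (1 <<< (PySem.Int.mod (step + 8) 16).toNat)
  else if points = 3 then
    PySem.Int.bor
      (PySem.Int.bor (1 <<< (PySem.Int.mod step 16).toNat) (1 <<< (PySem.Int.mod (step + 6) 16).toNat))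
      (1 <<< (PySem.Int.mod (step + 10) 16).toNat)
  else if points = 4 then
    PySem.Int.bor
      (PySem.Int.bor
        (PySem.Int.bor (1 <<< (PySem.Int.mod step 16).toNat)
          (1 <<< (PySem.Int.mod (step + 4) 16).toNat))
        (1 <<< (PySem.Int.mod (step + 8) 16).toNat))
      (1 <<< (PySem.Int.mod (step + 12) 16).toNat)
  else if points = 8 then
    (if PySem.Int.mod step 2 = 0 then 0xAAAA else 0x5555)
  else if points = 9 then
    (1 <<< (PySem.Int.mod step 16 + 1).toNat) - 1
  else if points = 10 then
    (1 <<< (PySem.Int.mod step 17).toNat) - 1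
  else if points = 11 then
    if 0 < step ∧ step < 17 then (1 <<< step.toNat) - 1
    else if step ≤ 0 then
      let m := min (-step) 16
      ((1 <<< m.toNat) - 1) <<< (16 - m).toNat
    else 0
  else if points = 15 then
    PySem.Int.bxor 0xFFFF (1 <<< (PySem.Int.mod step 16).toNat)
  else 0

-- ===== PRECONDITION & SPEC =====
def Spec_progresscounter (step : Int) (points : Int) (out : Int) : Prop := out = progresscounter_alt step points
instance (step : Int) (points : Int) (out : Int) : Decidable (Spec_progresscounter step points out) := by unfold Spec_progresscounter; infer_instance

-- ===== CLAIM (what is proved, stated in full; the proofs are below) =====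
def Claim_equal_progresscounter : Prop := ∀ (step : Int) (points : Int), Dom_progresscounter step points → Spec_progresscounter step points (progresscounter step points)

-- ===== LEMMAS AND PROOFS =====

theorem pc_mod16 (step : Int) : PySem.Int.mod step 16 = step % 16 :=
  PySem.Int.mod_eq_emod_of_pos (by norm_num)

theorem pc_mod17 (step : Int) : PySem.Int.mod step 17 = step % 17 :=
  PySem.Int.mod_eq_emod_of_pos (by norm_num)

theorem pc_modshift2 (step i : Int) :
    PySem.Int.mod (step + i) 2 = PySem.Int.mod (step % 2 + i) 2 := by
  rw [PySem.Int.mod_eq_emod_of_pos (by norm_num : (0:Int) < 2),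
    PySem.Int.mod_eq_emod_of_pos (by norm_num : (0:Int) < 2)]
  omega

theorem pc0 (step : Int) : progresscounter step 0 = progresscounter_alt step 0 := by
  have h : 0 ≤ step % 16 ∧ step % 16 < 16 := by omega
  simp only [progresscounter, progresscounter_alt, pc_mod16, Int.reduceEq, reduceIte]
  generalize step % 16 = r at h ⊢
  obtain ⟨h1, h2⟩ := h
  interval_cases r <;> decide

theorem pc1 (step : Int) : progresscounter step 1 = progresscounter_alt step 1 := by
  have h : 0 ≤ step % 16 ∧ step % 16 < 16 := by omega
  simp only [progresscounter, progresscounter_alt, pc_mod16, Int.reduceEq, reduceIte]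
  generalize step % 16 = r at h ⊢
  obtain ⟨h1, h2⟩ := h
  interval_cases r <;> decide

theorem pc2 (step : Int) : progresscounter step 2 = progresscounter_alt step 2 := by
  have h : 0 ≤ step % 16 ∧ step % 16 < 16 := by omega
  simp only [progresscounter, progresscounter_alt, pc_mod16, Int.reduceEq, reduceIte]
  rw [show (step + 8) % 16 = (step % 16 + 8) % 16 from by omega]
  generalize step % 16 = r at h ⊢
  obtain ⟨h1, h2⟩ := h
  interval_cases r <;> decide

theorem pc3 (step : Int) : progresscounter step 3 = progresscounter_alt step 3 := by
  have h : 0 ≤ step % 16 ∧ step % 16 < 16 := by omega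
  simp only [progresscounter, progresscounter_alt, pc_mod16, Int.reduceEq, reduceIte]
  rw [show (step + 6) % 16 = (step % 16 + 6) % 16 from by omega,
    show (step + 10) % 16 = (step % 16 + 10) % 16 from by omega]
  generalize step % 16 = r at h ⊢
  obtain ⟨h1, h2⟩ := h
  interval_cases r <;> decide

theorem pc4 (step : Int) : progresscounter step 4 = progresscounter_alt step 4 := by
  have h : 0 ≤ step % 16 ∧ step % 16 < 16 := by omega
  simp only [progresscounter, progresscounter_alt, pc_mod16, Int.reduceEq, reduceIte]
  rw [show (step + 4) % 16 = (step % 16 + 4) % 16 from by omega,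
    show (step + 8) % 16 = (step % 16 + 8) % 16 from by omega,
    show (step + 12) % 16 = (step % 16 + 12) % 16 from by omega]
  generalize step % 16 = r at h ⊢
  obtain ⟨h1, h2⟩ := h
  interval_cases r <;> decide

theorem pc8 (step : Int) : progresscounter step 8 = progresscounter_alt step 8 := by
  have h : 0 ≤ step % 2 ∧ step % 2 < 2 := by omega
  simp only [progresscounter, progresscounter_alt, Int.reduceEq, reduceIte]
  rw [show (fun (l : List Int) (i : Int) => l.set i.toNat (PySem.Int.mod (step + i) 2))
        = (fun (l : List Int) (i : Int) => l.set i.toNat (PySem.Int.mod (step % 2 + i) 2)) from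
        funext fun l => funext fun i => by rw [pc_modshift2],
    show PySem.Int.mod step 2 = step % 2 from PySem.Int.mod_eq_emod_of_pos (by norm_num)]
  generalize step % 2 = r at h ⊢
  obtain ⟨h1, h2⟩ := h
  interval_cases r <;> decide

theorem pc9 (step : Int) : progresscounter step 9 = progresscounter_alt step 9 := by
  have h : 0 ≤ step % 16 ∧ step % 16 < 16 := by omega
  simp only [progresscounter, progresscounter_alt, pc_mod16, Int.reduceEq, reduceIte]
  generalize step % 16 = r at h ⊢
  obtain ⟨h1, h2⟩ := h
  interval_cases r <;> decide

theorem pc10 (step : Int) : progresscounter step 10 = progresscounter_alt step 10 := by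
  have h : 0 ≤ step % 17 ∧ step % 17 < 17 := by omega
  simp only [progresscounter, progresscounter_alt, pc_mod17, Int.reduceEq, reduceIte]
  generalize step % 17 = r at h ⊢
  obtain ⟨h1, h2⟩ := h
  interval_cases r <;> decide

theorem pc15 (step : Int) : progresscounter step 15 = progresscounter_alt step 15 := by
  have h : 0 ≤ step % 16 ∧ step % 16 < 16 := by omega
  simp only [progresscounter, progresscounter_alt, pc_mod16, Int.reduceEq, reduceIte]
  generalize step % 16 = r at h ⊢
  obtain ⟨h1, h2⟩ := h
  interval_cases r <;> decide

theorem pc11 (step : Int) : progresscounter step 11 = progresscounter_alt step 11 := by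
  by_cases hb : -16 ≤ step ∧ step ≤ 17
  · obtain ⟨h1, h2⟩ := hb
    interval_cases step <;> decide
  · rcases lt_or_ge step 0 with hneg | hpos
    · -- step < -16: A's loop condition i < |step| is true for every i in range(16);
      -- B's min (-step) 16 clamps to 16.
      have hs : step < -16 := by omega
      simp only [progresscounter, progresscounter_alt, Int.reduceEq, reduceIte,
        if_neg (show ¬(step > 0 ∧ step < 17) from by omega),
        if_pos (show step ≤ 0 from by omega)]
      have hcongr : (PySem.List.pyRange 0 16 1).foldl
            (fun (l : List Int) (i : Int) => if i < |step| then l.set (15 - i).toNat 1 else l)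
            (List.replicate 16 0)
          = (PySem.List.pyRange 0 16 1).foldl
            (fun (l : List Int) (i : Int) => l.set (15 - i).toNat 1) (List.replicate 16 0) :=
        PySem.List.foldl_congr_mem _ _ _ _ (fun acc x hx => by
          rw [PySem.List.mem_pyRange_one] at hx
          rw [if_pos (by rw [abs_of_nonpos (by omega : step ≤ 0)]; omega)])
      rw [hcongr, show min (-step) 16 = 16 from by omega]
      decide
    · -- step > 17: no branch of either program fires; both give 0.
      have hs : 17 < step := by omega
      simp only [progresscounter, progresscounter_alt, Int.reduceEq, reduceIte,
        if_neg (show ¬(step > 0 ∧ step < 17) from by omega),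
        if_neg (show ¬step ≤ 0 from by omega)]
      decide

theorem pc_other (step points : Int)
    (h0 : points ≠ 0) (h1 : points ≠ 1) (h2 : points ≠ 2) (h3 : points ≠ 3) (h4 : points ≠ 4)
    (h8 : points ≠ 8) (h9 : points ≠ 9) (h10 : points ≠ 10) (h11 : points ≠ 11)
    (h15 : points ≠ 15) :
    progresscounter step points = progresscounter_alt step points := by
  simp only [progresscounter, progresscounter_alt, if_neg h0, if_neg h1, if_neg h2, if_neg h3,
    if_neg h4, if_neg h8, if_neg h9, if_neg h10, if_neg h11, if_neg h15]
  decide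

-- ===== VERDICT (by name: the statement is the Claim_ definition above) =====
theorem progresscounter_spec : Claim_equal_progresscounter := by
  intro step points _
  unfold Spec_progresscounter
  by_cases h0 : points = 0
  · subst h0; exact pc0 step
  by_cases h1 : points = 1
  · subst h1; exact pc1 step
  by_cases h2 : points = 2
  · subst h2; exact pc2 step
  by_cases h3 : points = 3
  · subst h3; exact pc3 step
  by_cases h4 : points = 4
  · subst h4; exact pc4 step
  by_cases h8 : points = 8
  · subst h8; exact pc8 step
  by_cases h9 : points = 9
  · subst h9; exact pc9 step
  by_cases h10 : points = 10
  · subst h10; exact pc10 step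
  by_cases h11 : points = 11
  · subst h11; exact pc11 step
  by_cases h15 : points = 15
  · subst h15; exact pc15 step
  exact pc_other step points h0 h1 h2 h3 h4 h8 h9 h10 h11 h15
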